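/- GENERATED by farm/mkstatement.py from design/units.tsv (unit `vorbis_decode_packet_rest.4d`) and the assertions of Vorbis/Spec/PacketRest4.lean — do not edit.
   THE STATEMENT of the proof unit `vorbis_decode_packet_rest.4d`: segment 4d of `vorbis_decode_packet_rest` (12 instructions; entries 0x110cad;
   exits 0x110ce2; ranges 0x110cad-0x110cde)
   takes each of its entry assertions to one of its exit assertions (`Vorbis.Spec.vorbis_decode_packet_rest.Seg4d`), given the contracts of its callees.
   What the names mean: Vorbis/Spec/Basic.lean (the shared hypotheses), Vorbis/Spec/PacketRest4.lean (the assertions). The theorem to prove: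
   `theorem vorbis_decode_packet_rest_4d_ok : Vorbis.Spec.vorbis_decode_packet_rest_4d.Statement`. -/
import Vorbis.Spec.PacketRest4
namespace Vorbis.Spec.vorbis_decode_packet_rest_4d
open X86 X86.User Asan

/-- The statement of unit `vorbis_decode_packet_rest.4d`. -/
def Statement : Prop :=
  ∀ (Lay : Layout) (_hLay : Lay.hi = 0x1000000) (μ : Microarch) (_hμ : UserX.MicroOK μ) (u₀ : State)
    (_hcode : HasCodeNat Lay u₀ Vorbis.L.vorbis_decode_packet_rest.entry Vorbis.Code.code_vorbis_decode_packet_rest.nat Vorbis.L.vorbis_decode_packet_rest.size)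
    (_h_asan_load1_noabort : Asan.SmallCheck Lay μ Vorbis.WayInv (Vorbis.CodeOK u₀) [.rax, .rdx] 1 Vorbis.L.__asan_load1_noabort.entry)
    (_h_asan_load8_noabort : Asan.SmallCheck Lay μ Vorbis.WayInv (Vorbis.CodeOK u₀) [.rax, .rcx, .rdx] 8 Vorbis.L.__asan_load8_noabort.entry)
    (_h_asan_load4_noabort : Asan.SmallCheck Lay μ Vorbis.WayInv (Vorbis.CodeOK u₀) [.rax, .rcx, .rdx] 4 Vorbis.L.__asan_load4_noabort.entry),
    Vorbis.Spec.vorbis_decode_packet_rest.Seg4d Lay μ u₀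

end Vorbis.Spec.vorbis_decode_packet_rest_4d
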